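-- pv_equiv track=rewrite | github.com/Gabriel180818/Codigos-TC | python/algoritmos.py | multiplicacionegipcia
-- ===== SOURCE A (Python) =====
-- def multiplicacionegipcia(a, b):
--     pasos = []
--     producto = 0
--
--     while a > 0:
--         if a % 2 == 1:
--             pasos.append(f"{a} x {b} = {b}")
--             producto += b
--         pasos.append(f"{a} / 2 = {a // 2}")
--         a = a // 2
--         b = b * 2
--
--     return producto, pasos
-- ===== SOURCE B (Python) =====
-- def multiplicacionegipcia(a, b):
--     if a <= 0:
--         return 0, []
--     pasos = []
--     producto = 0
--     if a % 2 == 1: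
--         pasos.append(f"{a} x {b} = {b}")
--         producto = b
--     pasos.append(f"{a} / 2 = {a // 2}")
--     sub_prod, sub_pasos = multiplicacionegipcia(a // 2, b * 2)
--     return producto + sub_prod, pasos + sub_pasos
-- ===== Notes on version B (the rewrite author's own statement) =====
-- stated objective: alternative
-- what changed: Replaced the while-loop with mutable accumulators by a recursion over the halving of a, combining each step's local contribution with the recursive result.
import Mathlib
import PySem

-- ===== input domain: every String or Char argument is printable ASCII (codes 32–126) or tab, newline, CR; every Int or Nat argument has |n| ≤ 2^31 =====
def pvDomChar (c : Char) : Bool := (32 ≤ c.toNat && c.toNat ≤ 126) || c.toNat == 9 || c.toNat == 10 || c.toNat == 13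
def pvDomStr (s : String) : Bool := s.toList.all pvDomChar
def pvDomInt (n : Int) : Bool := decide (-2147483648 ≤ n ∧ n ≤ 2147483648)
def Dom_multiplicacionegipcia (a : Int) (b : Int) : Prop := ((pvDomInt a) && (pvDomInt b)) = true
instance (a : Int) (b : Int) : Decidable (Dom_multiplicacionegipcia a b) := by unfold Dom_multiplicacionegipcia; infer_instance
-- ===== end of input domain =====

-- B replaces A's while-loop with mutable accumulators by a recursion over the halving of a (alternative decomposition, same cost).

-- ===== PORT A =====
-- the while loop of A: state (a, b, producto, pasos)
def mulLoopA (a b producto : Int) (pasos : List String) : Int × List String :=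
  if _h : a > 0 then
    let pasos' := if PySem.Int.mod a 2 = 1 then
        pasos ++ [PySem.Int.toStr a ++ " x " ++ PySem.Int.toStr b ++ " = " ++ PySem.Int.toStr b]
      else pasos
    let producto' := if PySem.Int.mod a 2 = 1 then producto + b else producto
    mulLoopA (PySem.Int.floordiv a 2) (b * 2) producto'
      (pasos' ++ [PySem.Int.toStr a ++ " / 2 = " ++ PySem.Int.toStr (PySem.Int.floordiv a 2)])
  else (producto, pasos)
termination_by a.toNat
decreasing_by
  rw [PySem.Int.floordiv_eq_ediv_of_pos (by norm_num)]
  omega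

def multiplicacionegipcia (a : Int) (b : Int) : Int × List String :=
  mulLoopA a b 0 []

-- ===== PORT B =====
def multiplicacionegipcia_alt (a : Int) (b : Int) : Int × List String :=
  if _h : a ≤ 0 then (0, [])
  else
    let pasos : List String :=
      if PySem.Int.mod a 2 = 1 then
        [PySem.Int.toStr a ++ " x " ++ PySem.Int.toStr b ++ " = " ++ PySem.Int.toStr b,
         PySem.Int.toStr a ++ " / 2 = " ++ PySem.Int.toStr (PySem.Int.floordiv a 2)]
      else [PySem.Int.toStr a ++ " / 2 = " ++ PySem.Int.toStr (PySem.Int.floordiv a 2)]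
    let producto : Int := if PySem.Int.mod a 2 = 1 then b else 0
    let sub := multiplicacionegipcia_alt (PySem.Int.floordiv a 2) (b * 2)
    (producto + sub.1, pasos ++ sub.2)
termination_by a.toNat
decreasing_by
  rw [PySem.Int.floordiv_eq_ediv_of_pos (by norm_num)]
  omega

-- ===== PRECONDITION & SPEC =====
def Spec_multiplicacionegipcia (a : Int) (b : Int) (out : Int × List String) : Prop := out = multiplicacionegipcia_alt a b
instance (a : Int) (b : Int) (out : Int × List String) : Decidable (Spec_multiplicacionegipcia a b out) := by unfold Spec_multiplicacionegipcia; infer_instance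

-- ===== CLAIM (what is proved, stated in full; the proofs are below) =====
def Claim_equal_multiplicacionegipcia : Prop := ∀ (a : Int) (b : Int), Dom_multiplicacionegipcia a b → Spec_multiplicacionegipcia a b (multiplicacionegipcia a b)

-- ===== LEMMAS AND PROOFS =====

-- A's loop computes B's recursion shifted by the accumulators.
lemma mulLoopA_eq_alt (a b producto : Int) (pasos : List String) :
    mulLoopA a b producto pasos =
      (producto + (multiplicacionegipcia_alt a b).1, pasos ++ (multiplicacionegipcia_alt a b).2) := by
  by_cases hpos : a > 0
  · have hd : PySem.Int.floordiv a 2 = a / 2 :=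
      PySem.Int.floordiv_eq_ediv_of_pos (by norm_num)
    have hm : PySem.Int.mod a 2 = a % 2 :=
      PySem.Int.mod_eq_emod_of_pos (by norm_num)
    have hrec := mulLoopA_eq_alt (PySem.Int.floordiv a 2) (b * 2)
    rw [hd] at hrec
    rw [mulLoopA, multiplicacionegipcia_alt]
    simp only [hpos, dif_pos, dif_neg (by omega : ¬ a ≤ 0), hd, hm]
    by_cases hodd : a % 2 = 1 <;> simp [hodd, hrec]; ring
  · rw [mulLoopA, multiplicacionegipcia_alt]
    simp only [dif_neg hpos, dif_pos (by omega : a ≤ 0)]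
    simp
termination_by a.toNat
decreasing_by
  rw [PySem.Int.floordiv_eq_ediv_of_pos (by norm_num)]
  omega

-- ===== VERDICT (by name: the statement is the Claim_ definition above) =====
theorem multiplicacionegipcia_spec : Claim_equal_multiplicacionegipcia := by
  intro a b _
  unfold Spec_multiplicacionegipcia multiplicacionegipcia
  rw [mulLoopA_eq_alt]
  simp
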